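-- pv_equiv track=rewrite | github.com/mbumbaguilherme3-cpu/Factura-oApp | billing_app/web.py | _extract_repeated_rows
-- ===== SOURCE A (Python) =====
-- def _extract_repeated_rows(form, fields: list[str]):
--     buckets = {field: form.get(field, []) for field in fields}
--     max_length = max([len(values) for values in buckets.values()] + [1])
--     rows = []
--     for index in range(max_length):
--         row = {}
--         for field in fields:
--             values = buckets[field]
--             row[field] = values[index] if index < len(values) else ""
--         if "discount_amount" in fields and not row.get("discount_amount"):
--             row["discount_amount"] = "0.00"
--         rows.append(row)
--     return rows
-- ===== SOURCE B (Python) =====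
-- def _extract_repeated_rows(form, fields: list[str]):
--     # Transpose the column lists head-by-tail instead of indexing by position.
--     cols = [form.get(f, []) for f in fields]
--     rows = []
--     while any(cols):
--         rows.append(dict(zip(fields, (c[0] if c else "" for c in cols))))
--         cols = [c[1:] for c in cols]
--     if not rows:
--         rows = [dict.fromkeys(fields, "")]
--     if "discount_amount" in fields:
--         for row in rows:
--             if not row.get("discount_amount"):
--                 row["discount_amount"] = "0.00"
--     return rows
-- ===== Notes on version B (the rewrite author's own statement) =====
-- stated objective: alternative
-- what changed: Replaces A's buckets-dict + max-length index loop (row[field] = values[index] if index < len(values) else '') with a head/tail transposition: column lists are peeled while any is nonempty, each step zipping fields with the current heads into a row dict, with an explicit single default row when no rows are produced.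
import Mathlib
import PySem

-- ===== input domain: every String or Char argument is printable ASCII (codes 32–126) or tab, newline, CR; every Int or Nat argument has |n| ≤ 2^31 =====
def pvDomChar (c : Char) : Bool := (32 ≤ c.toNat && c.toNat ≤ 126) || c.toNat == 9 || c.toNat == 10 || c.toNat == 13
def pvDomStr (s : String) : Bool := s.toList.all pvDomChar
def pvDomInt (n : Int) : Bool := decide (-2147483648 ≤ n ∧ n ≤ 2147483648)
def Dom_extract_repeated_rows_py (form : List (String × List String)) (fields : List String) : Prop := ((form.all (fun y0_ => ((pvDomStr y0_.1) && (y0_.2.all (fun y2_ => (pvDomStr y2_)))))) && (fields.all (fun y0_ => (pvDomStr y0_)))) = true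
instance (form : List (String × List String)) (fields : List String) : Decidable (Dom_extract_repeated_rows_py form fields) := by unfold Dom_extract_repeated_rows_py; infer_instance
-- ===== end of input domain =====

-- ===== PORT A =====
-- Transliteration of _extract_repeated_rows (form.get(field, []) = first-match
-- association-list lookup; row dicts are PySem.Dict, rendered as .items on return).
def extract_repeated_rows_py (form : List (String × List String)) (fields : List String) : List (List (String × String)) :=
  let buckets : PySem.Dict String (List String) :=
    PySem.Dict.ofList (fields.map (fun field => (field, (List.lookup field form).getD [])))
  let max_length : Nat := List.foldl max 0 ((buckets.values.map List.length) ++ [1])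
  let rows : List (PySem.Dict String String) :=
    List.foldl (fun rows index =>
      let row : PySem.Dict String String :=
        List.foldl (fun row field =>
          let values := buckets.getD field []
          row.insert field (if index < values.length then values.getD index "" else ""))
          PySem.Dict.empty fields
      let row2 := if fields.contains "discount_amount" && ((row.get? "discount_amount").getD "" == "")
        then row.insert "discount_amount" "0.00" else row
      rows ++ [row2]) [] (List.range max_length)
  rows.map (fun r => r.items)

-- ===== PORT B =====
-- termination facts for the while-any loop of B (cited by pvWhileRows's decreasing_by)
theorem pv_sum_tail_le (cols : List (List String)) :
    ((cols.map (fun c => c.drop 1)).map List.length).sum ≤ (cols.map List.length).sum := by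
  induction cols with
  | nil => simp
  | cons c t ih =>
    simp only [List.map_cons, List.sum_cons]
    have := List.length_drop (l := c) (i := 1)
    omega

theorem pv_sum_tail_lt (cols : List (List String)) (h : cols.any (fun c => !c.isEmpty) = true) :
    ((cols.map (fun c => c.drop 1)).map List.length).sum < (cols.map List.length).sum := by
  induction cols with
  | nil => simp at h
  | cons c t ih =>
    simp only [List.any_cons, Bool.or_eq_true] at h
    simp only [List.map_cons, List.sum_cons]
    rcases h with h | h
    · have hc : 1 ≤ c.length := by cases c <;> simp_all
      have := List.length_drop (l := c) (i := 1)
      have := pv_sum_tail_le t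
      omega
    · have := ih h
      have := List.length_drop (l := c) (i := 1)
      omega

-- B's while-any loop: emit the row of heads (dict(zip(fields, heads))), recurse on the tails.
def pvWhileRows (fields : List String) (cols : List (List String)) : List (PySem.Dict String String) :=
  if h : cols.any (fun c => !c.isEmpty) = true then
    PySem.Dict.ofList (fields.zip (cols.map (fun c => c.headD ""))) ::
      pvWhileRows fields (cols.map (fun c => c.drop 1))
  else []
termination_by (cols.map List.length).sum
decreasing_by simpa using pv_sum_tail_lt cols h

def extract_repeated_rows_py_alt (form : List (String × List String)) (fields : List String) : List (List (String × String)) :=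
  let cols := fields.map (fun f => (List.lookup f form).getD [])
  let rows0 := pvWhileRows fields cols
  let rows1 := if rows0.isEmpty then [PySem.Dict.ofList (fields.map (fun f => (f, "")))] else rows0
  let rows2 := if fields.contains "discount_amount" then
      rows1.map (fun row =>
        if (row.get? "discount_amount").getD "" == "" then row.insert "discount_amount" "0.00" else row)
    else rows1
  rows2.map (fun r => r.items)

-- ===== PRECONDITION & SPEC =====
def Spec_extract_repeated_rows_py (form : List (String × List String)) (fields : List String) (out : List (List (String × String))) : Prop := out = extract_repeated_rows_py_alt form fields
instance (form : List (String × List String)) (fields : List String) (out : List (List (String × String))) : Decidable (Spec_extract_repeated_rows_py form fields out) := by unfold Spec_extract_repeated_rows_py; infer_instance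

-- ===== CLAIM (what is proved, stated in full; the proofs are below) =====
def Claim_equal_extract_repeated_rows_py : Prop := ∀ (form : List (String × List String)) (fields : List String), Dom_extract_repeated_rows_py form fields → Spec_extract_repeated_rows_py form fields (extract_repeated_rows_py form fields)

-- ===== LEMMAS AND PROOFS =====
-- proof-side abbreviations: the column of a field, the common max row count, the
-- common row dict at index i, and the discount-amount fix-up
def pvL (form : List (String × List String)) (f : String) : List String := (List.lookup f form).getD []
def pvM (form : List (String × List String)) (fields : List String) : Nat :=
  List.foldl max 0 (fields.map (fun f => (pvL form f).length))
def pvRow (form : List (String × List String)) (fields : List String) (i : Nat) : PySem.Dict String String :=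
  List.foldl (fun row f => row.insert f ((pvL form f).getD i "")) PySem.Dict.empty fields
def pvFix (fields : List String) (row : PySem.Dict String String) : PySem.Dict String String :=
  if fields.contains "discount_amount" && ((row.get? "discount_amount").getD "" == "")
  then row.insert "discount_amount" "0.00" else row

theorem pv_ofList_map {ν : Type} (g : String → ν) (xs : List String) :
    PySem.Dict.ofList (xs.map (fun f => (f, g f)))
      = List.foldl (fun d f => d.insert f (g f)) PySem.Dict.empty xs := by
  simp [PySem.Dict.ofList, PySem.Dict.update, List.foldl_map]

theorem pv_get?_foldl_insert {ν : Type} (g : String → ν) :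
    ∀ (xs : List String) (d : PySem.Dict String ν) (k : String),
      (List.foldl (fun d f => d.insert f (g f)) d xs).get? k
        = if k ∈ xs then some (g k) else d.get? k := by
  intro xs
  induction xs with
  | nil => intro d k; simp
  | cons a t ih =>
    intro d k
    simp only [List.foldl_cons]
    rw [ih]
    by_cases hk : k ∈ t
    · simp [hk]
    · by_cases ha : k = a
      · subst ha; simp [hk, PySem.Dict.get?_insert_self]
      · rw [PySem.Dict.get?_insert]
        simp [hk, ha]

theorem pv_values_foldl_insert {ν : Type} (g : String → ν) :
    ∀ (xs : List String) (d : PySem.Dict String ν) (w : ν),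
      w ∈ (List.foldl (fun d f => d.insert f (g f)) d xs).values →
        (∃ f ∈ xs, w = g f) ∨ w ∈ d.values := by
  intro xs
  induction xs with
  | nil => intro d w h; simp only [List.foldl_nil] at h; exact Or.inr h
  | cons a t ih =>
    intro d w h
    simp only [List.foldl_cons] at h
    rcases ih _ _ h with ⟨f, hf, rfl⟩ | h
    · exact Or.inl ⟨f, List.mem_cons_of_mem _ hf, rfl⟩
    · rcases PySem.Dict.mem_values_insert d a (g a) w h with rfl | h
      · exact Or.inl ⟨a, List.mem_cons_self .., rfl⟩
      · exact Or.inr h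

theorem pv_mem_values_of_mem {ν : Type} (g : String → ν) (xs : List String) (f : String) (hf : f ∈ xs) :
    g f ∈ (List.foldl (fun d f => d.insert f (g f)) PySem.Dict.empty xs).values := by
  have h := pv_get?_foldl_insert g xs PySem.Dict.empty f
  rw [if_pos hf] at h
  have hm := PySem.Dict.mem_items_of_get?_eq_some _ h
  simp only [PySem.Dict.values]
  exact List.mem_map.mpr ⟨(f, g f), hm, rfl⟩

theorem pv_foldl_max_le (B : Nat) : ∀ (l : List Nat) (a : Nat), (∀ x ∈ l, x ≤ B) → a ≤ B →
    List.foldl max a l ≤ B := by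
  intro l
  induction l with
  | nil => intro a _ ha; simpa using ha
  | cons b t ih =>
    intro a h ha
    simp only [List.foldl_cons]
    exact ih (max a b) (fun x hx => h x (List.mem_cons_of_mem _ hx))
      (by have := h b (List.mem_cons_self ..); omega)

theorem pv_foldl_max_pred : ∀ (l : List Nat) (b : Nat),
    List.foldl max (b - 1) (l.map (fun x => x - 1)) = (List.foldl max b l) - 1 := by
  intro l
  induction l with
  | nil => intro b; simp
  | cons a t ih =>
    intro b
    simp only [List.map_cons, List.foldl_cons]
    rw [show max (b - 1) (a - 1) = (max b a) - 1 by omega, ih]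

theorem pvWhileRows_eq (fields : List String) :
    ∀ (n : Nat) (cols : List (List String)), List.foldl max 0 (cols.map List.length) = n →
      pvWhileRows fields cols
        = (List.range n).map (fun i =>
            PySem.Dict.ofList (fields.zip (cols.map (fun c => c.getD i "")))) := by
  intro n
  induction n with
  | zero =>
    intro cols h
    have hall : cols.any (fun c => !c.isEmpty) = false := by
      rw [List.any_eq_false]
      intro c hc
      have := (PySem.List.le_foldl_max (cols.map List.length) 0).2 c.length
        (List.mem_map.mpr ⟨c, hc, rfl⟩)
      rw [h] at this
      cases c <;> simp_all
    rw [pvWhileRows, hall]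
    simp
  | succ n ih =>
    intro cols h
    have hany : cols.any (fun c => !c.isEmpty) = true := by
      by_contra hno
      rw [Bool.not_eq_true, List.any_eq_false] at hno
      have hle : List.foldl max 0 (cols.map List.length) ≤ 0 := by
        apply pv_foldl_max_le
        · intro x hx
          rcases List.mem_map.mp hx with ⟨c, hc, rfl⟩
          have := hno c hc
          cases c <;> simp_all
        · exact le_refl 0
      omega
    have htail : List.foldl max 0 ((cols.map (fun c => c.drop 1)).map List.length) = n := by
      have h1 : (cols.map (fun c => c.drop 1)).map List.length
          = (cols.map List.length).map (fun x => x - 1) := by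
        simp only [List.map_map]
        exact List.map_congr_left (fun c _ => List.length_drop ..)
      rw [h1]
      have h2 := pv_foldl_max_pred (cols.map List.length) 0
      simp only [Nat.zero_sub] at h2
      rw [h2, h]
      omega
    have hhead : cols.map (fun c => c.headD "") = cols.map (fun c => c.getD 0 "") :=
      List.map_congr_left (fun c _ => by cases c <;> simp)
    have htl : ∀ i : Nat, (cols.map (fun c => List.drop 1 c)).map (fun c => c.getD i "")
        = cols.map (fun c => c.getD (i + 1) "") := by
      intro i
      rw [List.map_map]
      exact List.map_congr_left (fun c _ => by cases c <;> simp)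
    rw [pvWhileRows, hany]
    simp only [dite_eq_ite, if_true]
    rw [ih _ htail, List.range_succ_eq_map, List.map_cons, List.map_map, hhead]
    congr 1
    apply List.map_congr_left
    intro i _
    simp only [Function.comp]
    rw [htl i]

theorem pv_buckets_getD (form : List (String × List String)) (fields : List String)
    (f : String) (hf : f ∈ fields) :
    (PySem.Dict.ofList (fields.map (fun field => (field, (List.lookup field form).getD [])))).getD f []
      = pvL form f := by
  rw [pv_ofList_map (fun field => (List.lookup field form).getD [])]
  rw [PySem.Dict.getD_eq_get?_getD, pv_get?_foldl_insert, if_pos hf]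
  rfl

theorem pv_maxlen (form : List (String × List String)) (fields : List String) :
    List.foldl max 0
        ((((PySem.Dict.ofList (fields.map (fun field => (field, (List.lookup field form).getD [])))).values).map List.length) ++ [1])
      = max (pvM form fields) 1 := by
  rw [List.foldl_append]
  simp only [List.foldl_cons, List.foldl_nil]
  have hVM : List.foldl max 0
      (((PySem.Dict.ofList (fields.map (fun field => (field, (List.lookup field form).getD [])))).values).map List.length)
      = pvM form fields := by
    apply le_antisymm
    · apply pv_foldl_max_le
      · intro x hx
        rcases List.mem_map.mp hx with ⟨v, hv, rfl⟩
        rw [pv_ofList_map (fun field => (List.lookup field form).getD [])] at hv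
        rcases pv_values_foldl_insert _ _ _ _ hv with ⟨f, hf, rfl⟩ | hv
        · exact (PySem.List.le_foldl_max (fields.map (fun f => (pvL form f).length)) 0).2 _
            (List.mem_map.mpr ⟨f, hf, rfl⟩)
        · simp [PySem.Dict.values, PySem.Dict.empty] at hv
      · exact Nat.zero_le _
    · apply pv_foldl_max_le
      · intro x hx
        rcases List.mem_map.mp hx with ⟨f, hf, rfl⟩
        have hmem := pv_mem_values_of_mem (fun field => (List.lookup field form).getD []) fields f hf
        rw [← pv_ofList_map] at hmem
        exact (PySem.List.le_foldl_max _ 0).2 _ (List.mem_map.mpr ⟨_, hmem, rfl⟩)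
      · exact Nat.zero_le _
  rw [hVM]

theorem pv_rowA (form : List (String × List String)) (fields : List String) (i : Nat) :
    List.foldl (fun row field =>
        row.insert field
          (if i < ((PySem.Dict.ofList (fields.map (fun field => (field, (List.lookup field form).getD [])))).getD field []).length
           then ((PySem.Dict.ofList (fields.map (fun field => (field, (List.lookup field form).getD [])))).getD field []).getD i ""
           else ""))
      PySem.Dict.empty fields = pvRow form fields i := by
  unfold pvRow
  apply PySem.List.foldl_congr_mem
  intro acc f hf
  rw [pv_buckets_getD form fields f hf]
  by_cases hi : i < (pvL form f).length
  · rw [if_pos hi]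
  · rw [if_neg hi, List.getD_eq_default _ _ (by omega)]

theorem pv_portA_eq (form : List (String × List String)) (fields : List String) :
    extract_repeated_rows_py form fields
      = (List.range (max (pvM form fields) 1)).map (fun i => (pvFix fields (pvRow form fields i)).items) := by
  unfold extract_repeated_rows_py
  simp only [pv_maxlen, PySem.List.foldl_append_singleton_eq_map, List.nil_append, List.map_map]
  apply List.map_congr_left
  intro i _
  simp only [Function.comp, pv_rowA form fields i]
  rfl

theorem pv_portB_eq (form : List (String × List String)) (fields : List String) :
    extract_repeated_rows_py_alt form fields
      = (List.range (max (pvM form fields) 1)).map (fun i => (pvFix fields (pvRow form fields i)).items) := by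
  unfold extract_repeated_rows_py_alt
  have hrows0 : pvWhileRows fields (fields.map (fun f => (List.lookup f form).getD []))
      = (List.range (pvM form fields)).map (fun i => pvRow form fields i) := by
    rw [pvWhileRows_eq fields (pvM form fields) _ (by unfold pvM; rw [List.map_map]; rfl)]
    apply List.map_congr_left
    intro i _
    rw [List.map_map]
    simp only [Function.comp_def]
    have hzip := List.zip_map' (f := id)
      (g := fun f => ((List.lookup f form).getD []).getD i "") (l := fields)
    simp only [List.map_id, id_eq] at hzip
    rw [hzip, pv_ofList_map (fun f => ((List.lookup f form).getD []).getD i "")]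
    rfl
  simp only [hrows0]
  by_cases hM : pvM form fields = 0
  · rw [hM]
    simp only [List.range_zero, List.map_nil, List.isEmpty_nil, if_pos]
    have hdef : PySem.Dict.ofList (fields.map (fun f => (f, ""))) = pvRow form fields 0 := by
      rw [pv_ofList_map (fun _ => "")]
      unfold pvRow
      apply PySem.List.foldl_congr_mem
      intro acc f hf
      have hlen : (pvL form f).length ≤ pvM form fields :=
        (PySem.List.le_foldl_max (fields.map (fun f => (pvL form f).length)) 0).2 _
          (List.mem_map.mpr ⟨f, hf, rfl⟩)
      rw [List.getD_eq_default _ _ (by omega)]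
    rw [hdef]
    have hr : max (0 : Nat) 1 = 1 := by omega
    rw [hr]
    by_cases hc : "discount_amount" ∈ fields
    · simp [pvFix, hc, List.range_one]
    · simp [pvFix, hc, List.range_one]
  · have h1 : max (pvM form fields) 1 = pvM form fields := by omega
    rw [h1]
    have hne : (List.map (fun i => pvRow form fields i) (List.range (pvM form fields))).isEmpty = false := by
      simp [List.range_eq_nil, hM]
    simp only [hne, Bool.false_eq_true, if_false]
    by_cases hc : "discount_amount" ∈ fields
    · rw [if_pos (by simp [hc])]
      simp only [List.map_map]
      exact List.map_congr_left (fun i _ => by simp [Function.comp, pvFix, hc])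
    · rw [if_neg (by simp [hc])]
      simp only [List.map_map]
      exact List.map_congr_left (fun i _ => by simp [Function.comp, pvFix, hc])

-- ===== VERDICT (by name: the statement is the Claim_ definition above) =====
theorem extract_repeated_rows_py_spec : Claim_equal_extract_repeated_rows_py := by
  intro form fields _
  unfold Spec_extract_repeated_rows_py
  rw [pv_portA_eq, pv_portB_eq]
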